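-- pv_equiv track=rewrite | github.com/upendi007/Sea_Of_Habits | game.py | get_animal_streak
-- ===== SOURCE A (Python) =====
-- ANIMAL_FACTS = [
--     (1, "Seahorse", "Seahorses are among the only species where the male carries and gives birth to the young."),
--     (5, "Clownfish (Nemo)", "Clownfish live in symbiosis with sea anemones, whose stinging tentacles protect them from predators."),
--     (10, "Starfish", "Starfish can regenerate lost arms, and a single arm can grow into a whole new starfish."),
--     (25, "Octopus", "Octopuses have three hearts, blue blood, and can squeeze through any opening larger than their beak."),
--     (50, "Dolphin", "Dolphins sleep with one eye open, allowing one half of their brain to rest while the other remains alert."),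
--     (100, "Orca (Killer Whale)", "Orcas, also known as 'wolves of the sea,' are highly intelligent predators that hunt in organized pods using complex strategies.")
-- ]
--
-- def get_animal_streak(streak_length):
--     """Finds the highest achievement unlocked for a given streak length."""
--     achieved_animal_info = None
--     for required_distance, name, fact in ANIMAL_FACTS:
--         if streak_length >= required_distance:
--             achieved_animal_info = (required_distance, name, fact)
--         else:
--             break
--     return achieved_animal_info
-- ===== SOURCE B (Python) =====
-- import bisect
--
-- ANIMAL_FACTS = [
--     (1, "Seahorse", "Seahorses are among the only species where the male carries and gives birth to the young."),
--     (5, "Clownfish (Nemo)", "Clownfish live in symbiosis with sea anemones, whose stinging tentacles protect them from predators."),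
--     (10, "Starfish", "Starfish can regenerate lost arms, and a single arm can grow into a whole new starfish."),
--     (25, "Octopus", "Octopuses have three hearts, blue blood, and can squeeze through any opening larger than their beak."),
--     (50, "Dolphin", "Dolphins sleep with one eye open, allowing one half of their brain to rest while the other remains alert."),
--     (100, "Orca (Killer Whale)", "Orcas, also known as 'wolves of the sea,' are highly intelligent predators that hunt in organized pods using complex strategies.")
-- ]
--
-- _THRESHOLDS = [t[0] for t in ANIMAL_FACTS]
--
-- def get_animal_streak(streak_length):
--     """Finds the highest achievement unlocked for a given streak length."""
--     i = bisect.bisect_right(_THRESHOLDS, streak_length)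
--     if i == 0:
--         return None
--     return ANIMAL_FACTS[i - 1]
-- ===== Notes on version B (the rewrite author's own statement) =====
-- stated objective: idiomatic
-- what changed: Replaces the linear overwrite-and-break scan over ANIMAL_FACTS with bisect.bisect_right on the threshold list and a single index into ANIMAL_FACTS.
import Mathlib
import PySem

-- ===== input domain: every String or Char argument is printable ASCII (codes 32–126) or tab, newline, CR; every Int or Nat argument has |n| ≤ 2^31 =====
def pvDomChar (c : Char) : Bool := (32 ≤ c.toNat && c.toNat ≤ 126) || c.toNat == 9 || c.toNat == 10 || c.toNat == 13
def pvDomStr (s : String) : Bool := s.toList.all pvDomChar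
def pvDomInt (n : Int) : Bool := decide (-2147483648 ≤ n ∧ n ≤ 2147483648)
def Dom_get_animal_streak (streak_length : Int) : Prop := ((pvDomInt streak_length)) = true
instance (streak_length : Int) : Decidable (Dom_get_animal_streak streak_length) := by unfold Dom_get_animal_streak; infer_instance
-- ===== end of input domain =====

-- B replaces A's linear overwrite-and-break scan with bisect_right binary search over the
-- threshold list (objective: idiomatic; same result for every int input).

def animalFacts : List (Int × String × String) := [
  (1, "Seahorse", "Seahorses are among the only species where the male carries and gives birth to the young."),
  (5, "Clownfish (Nemo)", "Clownfish live in symbiosis with sea anemones, whose stinging tentacles protect them from predators."),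
  (10, "Starfish", "Starfish can regenerate lost arms, and a single arm can grow into a whole new starfish."),
  (25, "Octopus", "Octopuses have three hearts, blue blood, and can squeeze through any opening larger than their beak."),
  (50, "Dolphin", "Dolphins sleep with one eye open, allowing one half of their brain to rest while the other remains alert."),
  (100, "Orca (Killer Whale)", "Orcas, also known as 'wolves of the sea,' are highly intelligent predators that hunt in organized pods using complex strategies.")]

-- ===== PORT A =====
-- A's for-loop with break: recurse over the list, overwriting the accumulator until the test fails.
def getAnimalStreakLoop (streak_length : Int) :
    List (Int × String × String) → Option (Int × String × String) → Option (Int × String × String)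
  | [], acc => acc
  | (d, n, f) :: rest, acc =>
      if streak_length ≥ d then getAnimalStreakLoop streak_length rest (some (d, n, f))
      else acc

def get_animal_streak (streak_length : Int) : Option (Int × String × String) :=
  getAnimalStreakLoop streak_length animalFacts none

-- ===== PORT B =====
def animalThresholds : List Int := animalFacts.map (·.1)

-- transliteration of bisect.bisect_right's lo/hi while-loop (indices are Nats; mid is
-- always in range of the concrete 6-element list, so getD's default is never used)
def bisectRight (a : List Int) (x : Int) (lo hi : Nat) : Nat :=
  if h : lo < hi then
    let mid := (lo + hi) / 2
    if x < a.getD mid 0 then bisectRight a x lo mid else bisectRight a x (mid + 1) hi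
  else lo
termination_by hi - lo
decreasing_by all_goals omega

def get_animal_streak_alt (streak_length : Int) : Option (Int × String × String) :=
  let i := bisectRight animalThresholds streak_length 0 animalThresholds.length
  if i = 0 then none
  else animalFacts[i - 1]?   -- Python ANIMAL_FACTS[i-1]; i-1 < 6 always, so this is some _

-- ===== PRECONDITION & SPEC =====
def Spec_get_animal_streak (streak_length : Int) (out : Option (Int × String × String)) : Prop := out = get_animal_streak_alt streak_length
instance (streak_length : Int) (out : Option (Int × String × String)) : Decidable (Spec_get_animal_streak streak_length out) := by unfold Spec_get_animal_streak; infer_instance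

-- ===== CLAIM (what is proved, stated in full; the proofs are below) =====
def Claim_equal_get_animal_streak : Prop := ∀ (streak_length : Int), Dom_get_animal_streak streak_length → Spec_get_animal_streak streak_length (get_animal_streak streak_length)

-- ===== LEMMAS AND PROOFS =====

-- ===== VERDICT (by name: the statement is the Claim_ definition above) =====
theorem get_animal_streak_spec : Claim_equal_get_animal_streak := by
  intro s _
  unfold Spec_get_animal_streak get_animal_streak get_animal_streak_alt
  by_cases h1 : s < 1
  · simp [getAnimalStreakLoop, bisectRight, animalFacts, animalThresholds, ge_iff_le, show s < 1 by omega, show ¬ (1:Int) ≤ s by omega, show s < 5 by omega, show ¬ (5:Int) ≤ s by omega, show s < 10 by omega, show ¬ (10:Int) ≤ s by omega, show s < 25 by omega, show ¬ (25:Int) ≤ s by omega, show s < 50 by omega, show ¬ (50:Int) ≤ s by omega, show s < 100 by omega, show ¬ (100:Int) ≤ s by omega]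
  ·
    by_cases h5 : s < 5
    · simp [getAnimalStreakLoop, bisectRight, animalFacts, animalThresholds, ge_iff_le, show ¬ s < 1 by omega, show (1:Int) ≤ s by omega, show s < 5 by omega, show ¬ (5:Int) ≤ s by omega, show s < 10 by omega, show ¬ (10:Int) ≤ s by omega, show s < 25 by omega, show ¬ (25:Int) ≤ s by omega, show s < 50 by omega, show ¬ (50:Int) ≤ s by omega, show s < 100 by omega, show ¬ (100:Int) ≤ s by omega]
    ·
      by_cases h10 : s < 10
      · simp [getAnimalStreakLoop, bisectRight, animalFacts, animalThresholds, ge_iff_le, show ¬ s < 1 by omega, show (1:Int) ≤ s by omega, show ¬ s < 5 by omega, show (5:Int) ≤ s by omega, show s < 10 by omega, show ¬ (10:Int) ≤ s by omega, show s < 25 by omega, show ¬ (25:Int) ≤ s by omega, show s < 50 by omega, show ¬ (50:Int) ≤ s by omega, show s < 100 by omega, show ¬ (100:Int) ≤ s by omega]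
      ·
        by_cases h25 : s < 25
        · simp [getAnimalStreakLoop, bisectRight, animalFacts, animalThresholds, ge_iff_le, show ¬ s < 1 by omega, show (1:Int) ≤ s by omega, show ¬ s < 5 by omega, show (5:Int) ≤ s by omega, show ¬ s < 10 by omega, show (10:Int) ≤ s by omega, show s < 25 by omega, show ¬ (25:Int) ≤ s by omega, show s < 50 by omega, show ¬ (50:Int) ≤ s by omega, show s < 100 by omega, show ¬ (100:Int) ≤ s by omega]
        ·
          by_cases h50 : s < 50
          · simp [getAnimalStreakLoop, bisectRight, animalFacts, animalThresholds, ge_iff_le, show ¬ s < 1 by omega, show (1:Int) ≤ s by omega, show ¬ s < 5 by omega, show (5:Int) ≤ s by omega, show ¬ s < 10 by omega, show (10:Int) ≤ s by omega, show ¬ s < 25 by omega, show (25:Int) ≤ s by omega, show s < 50 by omega, show ¬ (50:Int) ≤ s by omega, show s < 100 by omega, show ¬ (100:Int) ≤ s by omega]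
          ·
            by_cases h100 : s < 100
            · simp [getAnimalStreakLoop, bisectRight, animalFacts, animalThresholds, ge_iff_le, show ¬ s < 1 by omega, show (1:Int) ≤ s by omega, show ¬ s < 5 by omega, show (5:Int) ≤ s by omega, show ¬ s < 10 by omega, show (10:Int) ≤ s by omega, show ¬ s < 25 by omega, show (25:Int) ≤ s by omega, show ¬ s < 50 by omega, show (50:Int) ≤ s by omega, show s < 100 by omega, show ¬ (100:Int) ≤ s by omega]
            · simp [getAnimalStreakLoop, bisectRight, animalFacts, animalThresholds, ge_iff_le, show ¬ s < 1 by omega, show (1:Int) ≤ s by omega, show ¬ s < 5 by omega, show (5:Int) ≤ s by omega, show ¬ s < 10 by omega, show (10:Int) ≤ s by omega, show ¬ s < 25 by omega, show (25:Int) ≤ s by omega, show ¬ s < 50 by omega, show (50:Int) ≤ s by omega, show ¬ s < 100 by omega, show (100:Int) ≤ s by omega]
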